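-- pv_equiv track=rewrite | github.com/rcplane/CS6120-L13-synthesis | solve.py | desugar_hole
-- ===== SOURCE A (Python) =====
-- def desugar_hole(source):
--     parts = source.split('??')
--     out = []
--     for (i, part) in enumerate(parts[:-1]):
--         out.append(part)
--         out.append('(hb{0} ? x : hn{0})'.format(i))
--     out.append(parts[-1])
--     return ''.join(out)
-- ===== SOURCE B (Python) =====
-- def desugar_hole(source):
--     out = []
--     i = 0
--     k = 0
--     n = len(source)
--     while i < n:
--         if source[i] == '?' and i + 1 < n and source[i + 1] == '?':
--             out.append('(hb{0} ? x : hn{0})'.format(k))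
--             k += 1
--             i += 2
--         else:
--             out.append(source[i])
--             i += 1
--     return ''.join(out)
-- ===== Notes on version B (the rewrite author's own statement) =====
-- stated objective: alternative
-- what changed: Replaced the split-on-marker / enumerate / list-building / join pipeline with a single left-to-right character scan that emits each numbered hole template in place of every double-question-mark marker.
import Mathlib
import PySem

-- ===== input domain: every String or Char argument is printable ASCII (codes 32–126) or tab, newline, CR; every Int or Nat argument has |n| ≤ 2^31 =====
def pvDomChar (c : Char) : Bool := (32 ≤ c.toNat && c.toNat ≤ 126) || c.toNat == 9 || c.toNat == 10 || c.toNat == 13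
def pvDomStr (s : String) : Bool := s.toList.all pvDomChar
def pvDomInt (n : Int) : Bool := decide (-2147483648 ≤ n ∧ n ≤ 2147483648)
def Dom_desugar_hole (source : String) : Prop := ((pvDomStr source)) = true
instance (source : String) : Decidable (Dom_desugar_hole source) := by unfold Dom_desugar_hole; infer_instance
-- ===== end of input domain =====

-- B replaces A's split/enumerate/join pipeline with a single left-to-right character scan
-- emitting each numbered hole template in place of each marker (objective: alternative decomposition, same cost).

-- the hole template '(hb{0} ? x : hn{0})'.format(i), shared text of both ports
def pvTmpl (i : Int) : List Char :=
  "(hb".toList ++ PySem.Int.toChars i ++ " ? x : hn".toList ++ PySem.Int.toChars i ++ ")".toList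

-- ===== PORT A =====
-- parts = source.split('??'); loop over enumerate(parts[:-1]) appending part and template; append parts[-1]; ''.join(out)
def desugar_hole (source : String) : String :=
  let parts := PySem.Chars.splitOn source.toList "??".toList
  let out : List (List Char) :=
    (PySem.List.enumerate (PySem.List.slice parts none (some (-1))) 0).foldl
      (fun out p => out ++ [p.2] ++ [pvTmpl p.1]) []
  let out := out ++ [PySem.List.pyGetD parts (-1) []]
  String.ofList (PySem.Chars.join [] out)

-- ===== PORT B =====
-- single scan: at a double-question-mark marker emit the k-th template and skip two characters, else copy the character
def pvScan : List Char → Int → List Char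
  | '?' :: '?' :: rest, k => pvTmpl k ++ pvScan rest (k + 1)
  | c :: rest, k => c :: pvScan rest k
  | [], _ => []

def desugar_hole_alt (source : String) : String :=
  String.ofList (pvScan source.toList 0)

-- ===== PRECONDITION & SPEC =====
def Spec_desugar_hole (source : String) (out : String) : Prop := out = desugar_hole_alt source
instance (source : String) (out : String) : Decidable (Spec_desugar_hole source out) := by unfold Spec_desugar_hole; infer_instance

-- ===== CLAIM (what is proved, stated in full; the proofs are below) =====
def Claim_equal_desugar_hole : Prop := ∀ (source : String), Dom_desugar_hole source → Spec_desugar_hole source (desugar_hole source)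

-- ===== LEMMAS AND PROOFS =====

-- structural version of str.split('??') (proof-side only)
def pvSplit : List Char → List (List Char)
  | '?' :: '?' :: rest => [] :: pvSplit rest
  | c :: rest => (pvSplit rest).modifyHead (c :: ·)
  | [] => [[]]

theorem pvSplit_ne_nil (l : List Char) : pvSplit l ≠ [] := by
  fun_induction pvSplit l with
  | case1 rest ih => simp
  | case2 c rest hx ih => cases hs : pvSplit rest <;> simp_all [List.modifyHead]
  | case3 => simp

theorem pvSplit_cons (c : Char) (rest : List Char)
    (h : ¬ ∃ rs, c :: rest = '?' :: '?' :: rs) :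
    pvSplit (c :: rest) = (pvSplit rest).modifyHead (c :: ·) := by
  rw [pvSplit.eq_def]
  split
  · rename_i heq; exact absurd ⟨_, heq⟩ h
  · rename_i heq; injection heq with h1 h2; subst h1 h2; rfl
  · rename_i heq; cases heq

theorem join_nil_flatten (xs : List (List Char)) : PySem.Chars.join [] xs = xs.flatten := by
  rw [PySem.Chars.join]
  induction xs with
  | nil => simp [List.intercalate]
  | cons a as ih => cases as <;> simp_all [List.intercalate, List.intersperse]

theorem go_spec (fuel : Nat) (l cur : List Char) (acc : List (List Char))
    (h : l.length < fuel) :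
    PySem.Chars.splitOn.go "??".toList fuel l cur acc
      = acc.reverse ++ (pvSplit l).modifyHead (cur.reverse ++ ·) := by
  induction fuel generalizing l cur acc with
  | zero => omega
  | succ fuel ih =>
    match l with
    | [] => simp [PySem.Chars.splitOn.go, pvSplit]
    | '?' :: '?' :: rest =>
      rw [PySem.Chars.splitOn.go]
      have hp : ("??".toList).isPrefixOf ('?' :: '?' :: rest) = true := by
        simp [List.isPrefixOf]
      rw [if_pos hp, ih _ _ _ (by simp at h ⊢; omega)]
      have hne := pvSplit_ne_nil rest
      simp only [pvSplit]
      cases hs : pvSplit rest with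
      | nil => exact absurd hs hne
      | cons a as => simp [List.modifyHead, hs]
    | c :: rest =>
      by_cases hpp : ("??".toList).isPrefixOf (c :: rest) = true
      · match rest, hpp with
        | [], hpp => simp [List.isPrefixOf] at hpp
        | r :: rs, hpp =>
          have hcr : '?' = c ∧ '?' = r := by
            simpa [List.isPrefixOf, and_assoc] using hpp
          obtain ⟨h1, h2⟩ := hcr
          subst h1; subst h2
          rw [PySem.Chars.splitOn.go, if_pos hpp, ih _ _ _ (by simp at h ⊢; omega)]
          have hne := pvSplit_ne_nil rs
          simp only [pvSplit]
          cases hs : pvSplit rs with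
          | nil => exact absurd hs hne
          | cons a as => simp [List.modifyHead, hs]
      · rw [PySem.Chars.splitOn.go, if_neg hpp, ih _ _ _ (by simp at h; omega)]
        have hne := pvSplit_ne_nil rest
        rw [pvSplit_cons c rest (by rintro ⟨rs, heq⟩; rw [heq] at hpp; simp [List.isPrefixOf] at hpp)]
        cases hs : pvSplit rest with
        | nil => exact absurd hs hne
        | cons a as => simp [List.modifyHead, List.reverse_cons]

theorem splitOn_eq_pvSplit (l : List Char) :
    PySem.Chars.splitOn l "??".toList = pvSplit l := by
  have hgo := go_spec (l.length + 1) l [] [] (by omega)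
  have hne := pvSplit_ne_nil l
  rw [PySem.Chars.splitOn, hgo]
  cases hs : pvSplit l with
  | nil => exact absurd hs hne
  | cons a as => simp [List.modifyHead]

-- glue parts[:-1] with numbered templates, then the last part
def pvGlue : List (List Char) → List Char → Int → List Char
  | [], last, _ => last
  | q :: qs, last, k => q ++ pvTmpl k ++ pvGlue qs last (k + 1)

theorem scan_eq_glue (l : List Char) (k : Int) :
    pvScan l k = pvGlue (pvSplit l).dropLast ((pvSplit l).getLastD []) k := by
  fun_induction pvScan l k with
  | case1 rest k ih =>
    have hne := pvSplit_ne_nil rest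
    cases hs : pvSplit rest with
    | nil => exact absurd hs hne
    | cons a as =>
      rw [hs] at ih
      simp only [pvSplit, hs, List.getLastD_cons] at ih ⊢
      simp [pvGlue, ih]
  | case2 c rest k hne1 ih =>
    have hne := pvSplit_ne_nil rest
    have hshape : pvSplit (c :: rest) = (pvSplit rest).modifyHead (c :: ·) := by
      apply pvSplit_cons
      rintro ⟨rs, heq⟩
      injection heq with h1 h2
      exact hne1 rs h1 h2
    rw [hshape]
    cases hs : pvSplit rest with
    | nil => exact absurd hs hne
    | cons a as =>
      rw [hs] at ih
      cases as with
      | nil => simpa [List.modifyHead, pvGlue] using ih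
      | cons b bs => simp [List.modifyHead, pvGlue] at ih ⊢; rw [ih]
  | case3 => simp [pvSplit, pvGlue]

theorem foldl_glue (qs : List (List Char)) (k : Int) (acc : List (List Char)) (last : List Char) :
    PySem.Chars.join []
        ((PySem.List.enumerate qs k).foldl (fun out p => out ++ [p.2] ++ [pvTmpl p.1]) acc ++ [last])
      = PySem.Chars.join [] acc ++ pvGlue qs last k := by
  induction qs generalizing k acc with
  | nil => simp [pvGlue, join_nil_flatten]
  | cons q qs ih =>
    rw [PySem.List.enumerate_cons, List.foldl_cons, ih]
    simp [pvGlue, join_nil_flatten]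

-- ===== VERDICT (by name: the statement is the Claim_ definition above) =====
theorem desugar_hole_spec : Claim_equal_desugar_hole := by
  intro source _
  show desugar_hole source = desugar_hole_alt source
  simp only [desugar_hole, desugar_hole_alt]
  have hlast : (pvSplit source.toList).getLastD [] = (pvSplit source.toList).getLast (pvSplit_ne_nil _) := by
    rw [List.getLastD_eq_getLast?, List.getLast?_eq_some_getLast (pvSplit_ne_nil _), Option.getD_some]
  rw [splitOn_eq_pvSplit, PySem.List.slice_to_neg_one,
    PySem.List.pyGetD_neg_one (pvSplit source.toList) [] (pvSplit_ne_nil _),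
    foldl_glue, scan_eq_glue, hlast]
  simp
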